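-- pv_equiv track=rewrite | github.com/JohnnyB0083/cryptocurrency-moon-helmets | Chapter1/generator/main.py | build_layer_weights_by_group
-- ===== SOURCE A (Python) =====
-- def build_layer_weights_by_group(layers):
--     """
--     Build up a dictionary that contains the group as the key and a list of the layers as the values with their names
--     and their weights as a tuple.
--     :param layers: A list of layers.
--     :return: A dictionary with the group as the key and the values as a list of tuple with the layer and the weights.
--     """
--     layer_dictionary = {}
--
--     for layer in layers:
--         this_group = str(layer[1])
--         group_layer_list = []
--
--         if this_group not in layer_dictionary:
--             layer_dictionary[this_group] = group_layer_list
--         else: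
--             group_layer_list = layer_dictionary[this_group]
--
--         layer_tuple = (layer[0], int(layer[3]))
--         group_layer_list.append(layer_tuple)
--
--     return layer_dictionary
-- ===== SOURCE B (Python) =====
-- def build_layer_weights_by_group(layers):
--     """Group layers by group key: one pass building transformed rows, then a
--     grouped comprehension per distinct key (first-occurrence order)."""
--     rows = [(str(layer[1]), (layer[0], int(layer[3]))) for layer in layers]
--     keys = list(dict.fromkeys(k for k, _ in rows))
--     return {k: [v for g, v in rows if g == k] for k in keys}
-- ===== Notes on version B (the rewrite author's own statement) =====
-- stated objective: alternative
-- what changed: Replaces A's single mutate-a-dict-of-lists loop by a declarative pipeline: build transformed (group, (name, weight)) rows once, dedup the group keys in first-occurrence order with dict.fromkeys, then emit one filtered comprehension per distinct key.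
import Mathlib
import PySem

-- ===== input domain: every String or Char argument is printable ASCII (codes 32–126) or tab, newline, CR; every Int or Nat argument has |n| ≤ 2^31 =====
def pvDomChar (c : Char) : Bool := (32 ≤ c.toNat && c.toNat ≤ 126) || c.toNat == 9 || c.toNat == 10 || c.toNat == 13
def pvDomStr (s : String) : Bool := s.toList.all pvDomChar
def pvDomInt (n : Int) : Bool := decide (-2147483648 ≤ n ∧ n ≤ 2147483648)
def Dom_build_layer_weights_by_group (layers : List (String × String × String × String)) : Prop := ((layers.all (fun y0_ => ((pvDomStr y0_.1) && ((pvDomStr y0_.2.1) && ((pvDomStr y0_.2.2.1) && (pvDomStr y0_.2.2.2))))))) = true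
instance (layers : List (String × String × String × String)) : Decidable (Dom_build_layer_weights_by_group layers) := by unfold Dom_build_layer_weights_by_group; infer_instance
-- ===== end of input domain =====

-- B replaces A's mutate-a-dict-of-lists loop by a map/dedup/filter pipeline (alternative decomposition, same values).

-- ===== PORT A =====
-- int(layer[3]); Pre_ guarantees ofStr? returns some, so the .getD 0 default is never reached on admitted inputs
def pvInt3 (layer : String × String × String × String) : Int :=
  (PySem.Int.ofStr? layer.2.2.2).getD 0

def build_layer_weights_by_group (layers : List (String × String × String × String)) : List (String × List (String × Int)) :=
  (layers.foldl (fun d layer =>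
      let this_group := layer.2.1
      let layer_tuple := (layer.1, pvInt3 layer)
      if d.contains this_group then
        d.insert this_group (d.getD this_group [] ++ [layer_tuple])
      else
        d.insert this_group ([] ++ [layer_tuple]))
    (PySem.Dict.empty : PySem.Dict String (List (String × Int)))).items

-- ===== PORT B =====
def build_layer_weights_by_group_alt (layers : List (String × String × String × String)) : List (String × List (String × Int)) :=
  let rows := layers.map (fun layer => (layer.2.1, (layer.1, pvInt3 layer)))
  let keys := PySem.Set.ofList (rows.map (·.1))
  keys.map (fun k => (k, (rows.filter (fun r => r.1 == k)).map (·.2)))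

-- ===== PRECONDITION & SPEC =====
-- Pre_ excludes exactly the inputs where Python's int(layer[3]) raises ValueError.
def Pre_build_layer_weights_by_group (layers : List (String × String × String × String)) : Prop :=
  ∀ layer ∈ layers, (PySem.Int.ofStr? layer.2.2.2).isSome
instance (layers : List (String × String × String × String)) : Decidable (Pre_build_layer_weights_by_group layers) := by unfold Pre_build_layer_weights_by_group; infer_instance
def pvWitness_build_layer_weights_by_group : (List (String × String × String × String)) :=
  [("conv1", "g1", "relu", "3"), ("conv2", "g2", "relu", "-4"), ("fc", "g1", "none", " 10 ")]

def Spec_build_layer_weights_by_group (layers : List (String × String × String × String)) (out : List (String × List (String × Int))) : Prop := out = build_layer_weights_by_group_alt layers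
instance (layers : List (String × String × String × String)) (out : List (String × List (String × Int))) : Decidable (Spec_build_layer_weights_by_group layers out) := by unfold Spec_build_layer_weights_by_group; infer_instance

-- ===== CLAIM (what is proved, stated in full; the proofs are below) =====
def Claim_equal_build_layer_weights_by_group : Prop := ∀ (layers : List (String × String × String × String)), Dom_build_layer_weights_by_group layers → Pre_build_layer_weights_by_group layers → Spec_build_layer_weights_by_group layers (build_layer_weights_by_group layers)

-- ===== LEMMAS AND PROOFS =====

-- A's branch-on-contains step IS the modify step
lemma pvStep_eq_modify (d : PySem.Dict String (List (String × Int))) (layer : String × String × String × String) :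
    (let this_group := layer.2.1
     let layer_tuple := (layer.1, pvInt3 layer)
     if d.contains this_group then
       d.insert this_group (d.getD this_group [] ++ [layer_tuple])
     else
       d.insert this_group ([] ++ [layer_tuple]))
    = d.modify layer.2.1 [] (· ++ [(layer.1, pvInt3 layer)]) := by
  simp only [PySem.Dict.modify]
  by_cases h : d.contains layer.2.1
  · simp [h]
  · have h' : d.contains layer.2.1 = false := by simpa using h
    simp [h', PySem.Dict.getD_of_not_contains]

lemma pvA_fold_eq (layers : List (String × String × String × String))
    (d : PySem.Dict String (List (String × Int))) :
    layers.foldl (fun d layer =>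
      let this_group := layer.2.1
      let layer_tuple := (layer.1, pvInt3 layer)
      if d.contains this_group then
        d.insert this_group (d.getD this_group [] ++ [layer_tuple])
      else
        d.insert this_group ([] ++ [layer_tuple])) d
    = layers.foldl (fun d layer => d.modify layer.2.1 [] (· ++ [(layer.1, pvInt3 layer)])) d := by
  induction layers generalizing d with
  | nil => rfl
  | cons x t ih =>
    simp only [List.foldl_cons]
    rw [pvStep_eq_modify]
    exact ih _

lemma pvA_eq_modify_fold (layers : List (String × String × String × String)) :
    build_layer_weights_by_group layers =
      ((layers.map (fun layer => (layer.2.1, (layer.1, pvInt3 layer)))).foldl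
        (fun d p => d.modify p.1 [] (· ++ [p.2]))
        (PySem.Dict.empty : PySem.Dict String (List (String × Int)))).items := by
  unfold build_layer_weights_by_group
  rw [List.foldl_map]
  congr 1
  exact pvA_fold_eq layers _

-- ===== VERDICT (by name: the statement is the Claim_ definition above) =====
theorem build_layer_weights_by_group_spec : Claim_equal_build_layer_weights_by_group := by
  intro layers _ _
  unfold Spec_build_layer_weights_by_group build_layer_weights_by_group_alt
  rw [pvA_eq_modify_fold]
  set rows := layers.map (fun layer => (layer.2.1, (layer.1, pvInt3 layer))) with hrows
  set d := rows.foldl (fun d p => d.modify p.1 [] (· ++ [p.2]))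
      (PySem.Dict.empty : PySem.Dict String (List (String × Int))) with hd
  have hkeys : d.keys = PySem.Set.ofList (rows.map (·.1)) := by
    rw [hd, PySem.Dict.keys_foldl_modify_key]
    simp [PySem.Set.update, PySem.Set.ofList]
  have hnd : d.keys.Nodup := by
    rw [hkeys]; exact PySem.Set.nodup_ofList _
  rw [PySem.Dict.items_eq_map_keys d hnd [], hkeys]
  apply List.map_congr_left
  intro k _
  congr 1
  rw [hd, PySem.Dict.getD_foldl_modify_append]
  simp
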